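-- pv_equiv track=rewrite | github.com/meizhong986/WhisperJAV | tests/test_redos_simple_demo.py | create_worst_case_text
-- ===== SOURCE A (Python) =====
-- def create_worst_case_text(length):
--     """
--     Create text that triggers maximum backtracking.
--
--     The pattern looks for: (phrase + separator) repeated 3+ times
--     This text has phrases with separators but NO repetition,
--     forcing the regex to try ALL combinations before failing.
--     """
--     # Different characters with separators - no repetition
--     chars = "あいうえおかきくけこさしすせそたちつてとなにぬねの"
--     result = []
--     for i in range(length):
--         char = chars[i % len(chars)]
--         sep = "、" if i % 3 == 0 else ("！" if i % 3 == 1 else "。")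
--         result.append(char + sep)
--     return "".join(result)
-- ===== SOURCE B (Python) =====
-- def create_worst_case_text(length):
--     chars = "あいうえおかきくけこさしすせそたちつてとなにぬねの"
--     seps = "\u3001\uff01\u3002"  # 、！。
--     # the (char, sep) pair sequence is periodic with period lcm(25, 3) = 75
--     block = "".join(chars[i % 25] + seps[i % 3] for i in range(75))
--     if length <= 0:
--         return ""
--     q, r = divmod(length, 75)
--     return block * q + block[:2 * r]
-- ===== Notes on version B (the rewrite author's own statement) =====
-- stated objective: faster
-- what changed: Instead of computing a char+sep pair for each of the length iterations, B builds the 75-pair period block once (lcm(25,3)=75) and returns block*(length//75) plus the block prefix covering length%75 pairs.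
import Mathlib
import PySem

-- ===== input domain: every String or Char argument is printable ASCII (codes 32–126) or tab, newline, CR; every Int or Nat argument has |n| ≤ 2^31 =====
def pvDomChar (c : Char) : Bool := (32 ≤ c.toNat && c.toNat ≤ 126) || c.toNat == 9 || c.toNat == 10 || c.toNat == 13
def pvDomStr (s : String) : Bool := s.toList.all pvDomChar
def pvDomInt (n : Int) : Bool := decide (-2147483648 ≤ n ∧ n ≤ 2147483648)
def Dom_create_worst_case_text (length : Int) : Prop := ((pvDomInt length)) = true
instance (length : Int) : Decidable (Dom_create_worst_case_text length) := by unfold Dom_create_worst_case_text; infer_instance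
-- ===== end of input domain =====

-- B builds the 75-pair period block once and replicates/slices it instead of looping length times (faster).

-- ===== PORT A =====
def pvChars : List Char := "あいうえおかきくけこさしすせそたちつてとなにぬねの".toList

def create_worst_case_text (length : Int) : String :=
  String.ofList ((PySem.List.pyRange 0 length 1).foldl
    (fun acc i =>
      acc ++ [PySem.List.pyGetD pvChars (PySem.Int.mod i (pvChars.length : Int)) ' ',
              if PySem.Int.mod i 3 = 0 then '、' else if PySem.Int.mod i 3 = 1 then '！' else '。']) [])

-- ===== PORT B =====
def pvSeps : List Char := "、！。".toList

def pvBlock : List Char :=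
  (PySem.List.pyRange 0 75 1).foldl
    (fun acc i =>
      acc ++ [PySem.List.pyGetD pvChars (PySem.Int.mod i 25) ' ',
              PySem.List.pyGetD pvSeps (PySem.Int.mod i 3) ' ']) []

def create_worst_case_text_alt (length : Int) : String :=
  if length ≤ 0 then "" else
    let q := PySem.Int.floordiv length 75
    let r := PySem.Int.mod length 75
    String.ofList ((List.replicate q.toNat pvBlock).flatten ++
               PySem.List.slice pvBlock none (some (2 * r)))

-- ===== PRECONDITION & SPEC =====
def Spec_create_worst_case_text (length : Int) (out : String) : Prop := out = create_worst_case_text_alt length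
instance (length : Int) (out : String) : Decidable (Spec_create_worst_case_text length out) := by unfold Spec_create_worst_case_text; infer_instance

-- ===== CLAIM (what is proved, stated in full; the proofs are below) =====
def Claim_equal_create_worst_case_text : Prop := ∀ (length : Int), Dom_create_worst_case_text length → Spec_create_worst_case_text length (create_worst_case_text length)

-- ===== LEMMAS AND PROOFS =====

-- one (char, separator) pair, in B's formulation
def pvPair (i : Int) : List Char :=
  [PySem.List.pyGetD pvChars (PySem.Int.mod i 25) ' ',
   PySem.List.pyGetD pvSeps (PySem.Int.mod i 3) ' ']

def pvG (n : Nat) : List Char := (List.range n).flatMap (fun k : Nat => pvPair ((k : Nat) : Int))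

theorem pvSep_eq (i : Int) :
    (if PySem.Int.mod i 3 = 0 then '、' else if PySem.Int.mod i 3 = 1 then '！' else '。')
      = PySem.List.pyGetD pvSeps (PySem.Int.mod i 3) ' ' := by
  have hm : PySem.Int.mod i 3 = i % 3 := PySem.Int.mod_eq_emod_of_pos (by norm_num)
  have h3 : i % 3 = 0 ∨ i % 3 = 1 ∨ i % 3 = 2 := by omega
  rcases h3 with h | h | h <;> simp [h] <;> decide

theorem pvA_eq_G (length : Int) :
    create_worst_case_text length = String.ofList (pvG length.toNat) := by
  unfold create_worst_case_text pvG
  rw [PySem.List.pyRange_one, List.foldl_map,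
    PySem.List.foldl_append_eq_flatMap
      (g := fun k : Nat =>
        [PySem.List.pyGetD pvChars (PySem.Int.mod (0 + (k : Int)) (pvChars.length : Int)) ' ',
         if PySem.Int.mod (0 + (k : Int)) 3 = 0 then '、'
         else if PySem.Int.mod (0 + (k : Int)) 3 = 1 then '！' else '。'])]
  have hn : (length - 0).toNat = length.toNat := by omega
  rw [hn]
  have hlen : (pvChars.length : Int) = 25 := by decide
  congr 1
  apply List.flatMap_congr
  intro k _
  simp only [pvPair, zero_add, hlen, pvSep_eq]

theorem pvBlock_eq_G : pvBlock = pvG 75 := by decide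

theorem pvPair_period (i : Int) : pvPair (i + 75) = pvPair i := by
  unfold pvPair
  have h25 : PySem.Int.mod (i + 75) 25 = PySem.Int.mod i 25 := by
    rw [PySem.Int.mod_eq_emod_of_pos (by norm_num), PySem.Int.mod_eq_emod_of_pos (by norm_num)]
    omega
  have h3 : PySem.Int.mod (i + 75) 3 = PySem.Int.mod i 3 := by
    rw [PySem.Int.mod_eq_emod_of_pos (by norm_num), PySem.Int.mod_eq_emod_of_pos (by norm_num)]
    omega
  rw [h25, h3]

theorem pvG_add_75 (n : Nat) : pvG (75 + n) = pvG 75 ++ pvG n := by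
  unfold pvG
  rw [List.range_add, List.flatMap_append, List.flatMap_map]
  congr 1
  apply List.flatMap_congr
  intro k _
  have : ((75 + k : Nat) : Int) = (k : Int) + 75 := by push_cast; ring
  rw [this, pvPair_period]

theorem pvPair_len (i : Int) : (pvPair i).length = 2 := rfl

theorem pvG_len (n : Nat) : (pvG n).length = 2 * n := by
  induction n with
  | zero => rfl
  | succ m ih =>
    unfold pvG at *
    rw [List.range_succ, List.flatMap_append]
    simp [ih, pvPair_len]
    omega

theorem pvG_small (n : Nat) (h : n ≤ 75) : pvG n = (pvG 75).take (2 * n) := by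
  have hsplit : pvG 75 = pvG n ++ ((List.range (75 - n)).map (fun k => n + k)).flatMap (fun k : Nat => pvPair ((k : Nat) : Int)) := by
    unfold pvG
    rw [← List.flatMap_append]
    have h75 : (75 : Nat) = n + (75 - n) := by omega
    rw [h75, List.range_add]
    have hnn : n + (75 - n) - n = 75 - n := by omega
    rw [hnn]
  rw [hsplit, List.take_append_of_le_length (by simp [pvG_len]), List.take_of_length_le (by simp [pvG_len])]

theorem pvG_main (n : Nat) : pvG n = (List.replicate (n / 75) pvBlock).flatten ++ pvBlock.take (2 * (n % 75)) := by
  induction n using Nat.strong_induction_on with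
  | _ n ih =>
    by_cases h : n < 75
    · rw [Nat.div_eq_of_lt h, Nat.mod_eq_of_lt h]
      simp [pvBlock_eq_G, pvG_small n (by omega)]
    · have hn : n = 75 + (n - 75) := by omega
      rw [hn, pvG_add_75, ih (n - 75) (by omega)]
      have hd : (75 + (n - 75)) / 75 = (n - 75) / 75 + 1 := by omega
      have hm : (75 + (n - 75)) % 75 = (n - 75) % 75 := by omega
      rw [hd, hm, List.replicate_succ, List.flatten_cons, pvBlock_eq_G, List.append_assoc]

-- ===== VERDICT (by name: the statement is the Claim_ definition above) =====
theorem create_worst_case_text_spec : Claim_equal_create_worst_case_text := by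
  intro length _
  unfold Spec_create_worst_case_text
  rw [pvA_eq_G]
  unfold create_worst_case_text_alt
  by_cases h : length ≤ 0
  · have : length.toNat = 0 := by omega
    rw [this]
    simp [pvG, h]
  · have hq : (PySem.Int.floordiv length 75).toNat = length.toNat / 75 := by
      rw [PySem.Int.floordiv_eq_ediv_of_pos (by norm_num)]
      omega
    have hm : PySem.Int.mod length 75 = ((length.toNat % 75 : Nat) : Int) := by
      rw [PySem.Int.mod_eq_emod_of_pos (by norm_num)]
      omega
    have hr : PySem.List.slice pvBlock none (some (2 * PySem.Int.mod length 75))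
        = pvBlock.take (2 * (length.toNat % 75)) := by
      rw [hm, PySem.List.slice_to (xs := pvBlock) (b := 2 * ((length.toNat % 75 : Nat) : Int)) (by omega)]
      have h2 : ((2 : Int) * ((length.toNat % 75 : Nat) : Int)).toNat = 2 * (length.toNat % 75) := by omega
      rw [h2]
    simp only [h, if_false, hq, hr]
    rw [pvG_main length.toNat]
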